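-- pv_equiv track=rewrite | github.com/zuchengchen/systematic_trading | scripts/sync_pdf_bold_spans.py | skip_braced_group
-- ===== SOURCE A (Python) =====
-- def skip_whitespace(text: str, index: int) -> int:
--     while index < len(text) and text[index].isspace():
--         index += 1
--     return index
--
-- def skip_braced_group(text: str, index: int) -> int:
--     index = skip_whitespace(text, index)
--     if index >= len(text) or text[index] != "{":
--         return index
--     depth = 1
--     index += 1
--     while index < len(text) and depth:
--         if text[index] == "\\":
--             index += 2
--             continue
--         if text[index] == "{":
--             depth += 1
--         elif text[index] == "}":
--             depth -= 1
--         index += 1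
--     return index
-- ===== SOURCE B (Python) =====
-- def skip_whitespace(text: str, index: int) -> int:
--     while index < len(text) and text[index].isspace():
--         index += 1
--     return index
--
-- def _tokens(text: str, i: int):
--     # pass 1: resolve escapes, materializing the reachable (position, char)
--     # tokens and the index where the walk fell off the end of the text
--     toks = []
--     while i < len(text):
--         c = text[i]
--         if c == "\\":
--             i += 2
--         else:
--             toks.append((i, c))
--             i += 1
--     return toks, i
--
-- def skip_braced_group(text: str, index: int) -> int:
--     i = skip_whitespace(text, index)
--     if i < len(text) and text[i] == "{":
--         toks, end = _tokens(text, i + 1)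
--         # pass 2: depth scan over the escape-free token list
--         depth = 1
--         for pos, c in toks:
--             if c == "{":
--                 depth += 1
--             elif c == "}":
--                 depth -= 1
--             if depth == 0:
--                 return pos + 1
--         return end
--     return i
-- ===== Notes on version B (the rewrite author's own statement) =====
-- stated objective: alternative
-- what changed: A's single fused loop that tracks brace depth and escapes together is split into two staged passes: a first pass resolves backslash escapes and materializes the list of reachable (position, char) tokens, then a second pass scans that list with a depth counter to find the matching close brace.
import Mathlib
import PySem

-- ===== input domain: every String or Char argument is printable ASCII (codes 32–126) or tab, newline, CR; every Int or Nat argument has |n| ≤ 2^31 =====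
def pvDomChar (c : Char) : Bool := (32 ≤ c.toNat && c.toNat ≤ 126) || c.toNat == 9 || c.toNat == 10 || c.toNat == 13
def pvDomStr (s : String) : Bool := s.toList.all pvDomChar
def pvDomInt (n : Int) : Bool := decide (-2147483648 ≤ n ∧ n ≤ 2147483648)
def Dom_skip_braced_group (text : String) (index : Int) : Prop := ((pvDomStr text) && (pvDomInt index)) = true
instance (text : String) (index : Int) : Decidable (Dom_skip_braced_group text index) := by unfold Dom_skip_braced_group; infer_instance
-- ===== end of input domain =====

-- B splits A's fused depth-and-escape loop into two staged passes (escape resolution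
-- building a token list, then a depth scan over it); same cost, proved equal wherever A returns.
-- The 'fuel' of the loop ports is only a totality guard (2*len+2 always suffices: the index
-- grows each step and never exceeds len+1); both ports use the same fuel expression.

-- ===== PORT A =====
-- helper skip_whitespace (identical in both Pythons)
def pvSkipWs (cs : List Char) (fuel : Nat) (index : Int) : Int :=
  match fuel with
  | 0 => index
  | fuel + 1 =>
    if index < (cs.length : Int) then
      match PySem.List.pyGet? cs index with
      | none => index            -- Python raises IndexError here (index < -len); outside Pre_
      | some c => if PySem.Chars.isspace c then pvSkipWs cs fuel (index + 1) else index
    else index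

-- A's while-loop with the explicit depth counter
def pvLoopA (cs : List Char) (fuel : Nat) (index : Int) (depth : Int) : Int :=
  match fuel with
  | 0 => index
  | fuel + 1 =>
    if index < (cs.length : Int) ∧ depth ≠ 0 then
      match PySem.List.pyGet? cs index with
      | none => index            -- Python raises IndexError here; unreachable under Pre_
      | some c =>
        if c = '\\' then pvLoopA cs fuel (index + 2) depth
        else if c = '{' then pvLoopA cs fuel (index + 1) (depth + 1)
        else if c = '}' then pvLoopA cs fuel (index + 1) (depth - 1)
        else pvLoopA cs fuel (index + 1) depth
    else index

def skip_braced_group (text : String) (index : Int) : Int :=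
  let cs := text.toList
  let i := pvSkipWs cs (2 * cs.length + 2) index
  if i ≥ (cs.length : Int) then i
  else match PySem.List.pyGet? cs i with
    | none => i                  -- Python raises IndexError; unreachable under Pre_
    | some c => if c ≠ '{' then i else pvLoopA cs (2 * cs.length + 2) (i + 1) 1

-- ===== PORT B =====
-- pass 1 (_tokens): resolve escapes, returning the reachable (position, char) tokens
-- together with the final fall-off-the-end index
def pvTokens (cs : List Char) (fuel : Nat) (i : Int) : List (Int × Char) × Int :=
  match fuel with
  | 0 => ([], i)
  | fuel + 1 =>
    if i < (cs.length : Int) then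
      match PySem.List.pyGet? cs i with
      | none => ([], i)          -- Python raises IndexError; unreachable under Pre_
      | some c =>
        if c = '\\' then pvTokens cs fuel (i + 2)
        else ((i, c) :: (pvTokens cs fuel (i + 1)).1, (pvTokens cs fuel (i + 1)).2)
    else ([], i)

-- pass 2: depth scan over the escape-free token list
def pvClose (depth : Int) (theEnd : Int) : List (Int × Char) → Int
  | [] => theEnd
  | (pos, c) :: toks =>
    let d := if c = '{' then depth + 1 else if c = '}' then depth - 1 else depth
    if d = 0 then pos + 1 else pvClose d theEnd toks

def skip_braced_group_alt (text : String) (index : Int) : Int :=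
  let cs := text.toList
  let i := pvSkipWs cs (2 * cs.length + 2) index
  -- 'text[i] == "{"' raises IndexError when pyGet? is none (index < -len); unreachable under Pre_
  if i < (cs.length : Int) ∧ PySem.List.pyGet? cs i = some '{' then
    pvClose 1 (pvTokens cs (2 * cs.length + 2) (i + 1)).2 (pvTokens cs (2 * cs.length + 2) (i + 1)).1
  else i

-- ===== PRECONDITION & SPEC =====
-- Pre_ excludes exactly the inputs where the Python A raises IndexError: index < -len(text)
-- (skip_whitespace's text[index] wraps for -len ≤ index < 0 and raises below that).
def Pre_skip_braced_group (text : String) (index : Int) : Prop :=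
  -(text.toList.length : Int) ≤ index
instance (text : String) (index : Int) : Decidable (Pre_skip_braced_group text index) := by
  unfold Pre_skip_braced_group; infer_instance
def pvWitness_skip_braced_group : String × Int := ("{a{b}\\}c}d", 0)

def Spec_skip_braced_group (text : String) (index : Int) (out : Int) : Prop := out = skip_braced_group_alt text index
instance (text : String) (index : Int) (out : Int) : Decidable (Spec_skip_braced_group text index out) := by unfold Spec_skip_braced_group; infer_instance

-- ===== CLAIM (what is proved, stated in full; the proofs are below) =====
def Claim_equal_skip_braced_group : Prop := ∀ (text : String) (index : Int), Dom_skip_braced_group text index → Pre_skip_braced_group text index → Spec_skip_braced_group text index (skip_braced_group text index)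

-- ===== LEMMAS AND PROOFS =====

-- with depth 0, A's loop exits immediately
theorem loopA_zero (cs : List Char) (fuel : Nat) (index : Int) :
    pvLoopA cs fuel index 0 = index := by
  cases fuel with
  | zero => simp [pvLoopA]
  | succ f => simp [pvLoopA]

-- key lemma: A's fused loop equals B's depth scan over B's escape-resolved token list
theorem loopA_eq_close (cs : List Char) : ∀ (fuel : Nat) (i depth : Int), 1 ≤ depth →
    pvLoopA cs fuel i depth
      = pvClose depth (pvTokens cs fuel i).2 (pvTokens cs fuel i).1 := by
  intro fuel
  induction fuel with
  | zero => intro i depth _; simp [pvLoopA, pvTokens, pvClose]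
  | succ f IH =>
    intro i depth hd
    simp only [pvLoopA, pvTokens]
    by_cases hlt : i < (cs.length : Int)
    · rw [if_pos (show i < (cs.length : Int) ∧ depth ≠ 0 from ⟨hlt, by omega⟩), if_pos hlt]
      cases hg : PySem.List.pyGet? cs i with
      | none => simp [pvClose]
      | some c =>
        simp only
        by_cases hbs : c = '\\'
        · rw [if_pos hbs, if_pos hbs]
          exact IH (i + 2) depth hd
        · rw [if_neg hbs, if_neg hbs]
          simp only [pvClose]
          by_cases hob : c = '{'
          · rw [if_pos hob]
            simp only [if_pos hob]
            rw [if_neg (show ¬ (depth + 1 = 0) by omega)]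
            exact IH (i + 1) (depth + 1) (by omega)
          · rw [if_neg hob]
            simp only [if_neg hob]
            by_cases hcb : c = '}'
            · rw [if_pos hcb]
              simp only [if_pos hcb]
              by_cases h1 : depth = 1
              · rw [if_pos (by omega)]
                subst h1
                simp only [sub_self]
                exact loopA_zero cs f (i + 1)
              · rw [if_neg (by omega)]
                exact IH (i + 1) (depth - 1) (by omega)
            · rw [if_neg hcb]
              simp only [if_neg hcb]
              rw [if_neg (by omega)]
              exact IH (i + 1) depth hd
    · rw [if_neg (by tauto), if_neg hlt]
      simp [pvClose]

theorem ports_agree (text : String) (index : Int) :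
    skip_braced_group text index = skip_braced_group_alt text index := by
  unfold skip_braced_group skip_braced_group_alt
  simp only []
  set cs := text.toList with hcs
  set i := pvSkipWs cs (2 * cs.length + 2) index with hi
  by_cases hend : i ≥ (cs.length : Int)
  · rw [if_pos hend, if_neg (fun h => absurd h.1 (by omega))]
  · rw [if_neg hend]
    cases hg : PySem.List.pyGet? cs i with
    | none => simp
    | some c =>
      by_cases hob : c = '{'
      · subst hob
        have hlt : i < (cs.length : Int) := by omega
        show (if ('{' : Char) ≠ '{' then i else pvLoopA cs (2 * cs.length + 2) (i + 1) 1) = _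
        rw [if_neg (by simp), if_pos (show i < (cs.length : Int) ∧ (some '{' = some '{') from ⟨hlt, rfl⟩)]
        exact loopA_eq_close cs (2 * cs.length + 2) (i + 1) 1 (le_refl 1)
      · simp [hob]

-- ===== VERDICT (by name: the statement is the Claim_ definition above) =====
theorem skip_braced_group_spec : Claim_equal_skip_braced_group := by
  intro text index _hd _hpre
  exact ports_agree text index
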